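-- pv_equiv track=rewrite | github.com/MFarchive/Vigenere-Cipher | Vigenere_Solver.py | spacings
-- ===== SOURCE A (Python) =====
-- def indexes(words,word):
--     results = []
--     for i in range(0,len(words)):
--         try:
--             index = words.index(word,i)
--         except:
--             break
--         if index not in results:
--                 results.append(index)
--     return results
--
-- def spacings(elements, filtered):
--     numbers = []
--     for i in range(0,len(filtered)):
--         numbers.append(indexes(elements,list(filtered)[i]))
--
--     difference =[]
--     for i in numbers:
--         for j in range(0,len(i)-1):
--             difference.append(i[j+1]-i[j])
--     return difference
-- ===== SOURCE B (Python) =====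
-- def spacings(elements, filtered):
--     pos = {}
--     for i, w in enumerate(elements):
--         pos.setdefault(w, []).append(i)
--     out = []
--     for w in filtered:
--         ps = pos.get(w, [])
--         for a, b in zip(ps, ps[1:]):
--             out.append(b - a)
--     return out
-- ===== Notes on version B (the rewrite author's own statement) =====
-- stated objective: faster
-- what changed: Replaces the per-word repeated list.index scans (a fresh O(n^2) indexes() pass for every filtered word) with one enumerate pass building a word->positions dict, then consecutive differences per filtered word.
import Mathlib
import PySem

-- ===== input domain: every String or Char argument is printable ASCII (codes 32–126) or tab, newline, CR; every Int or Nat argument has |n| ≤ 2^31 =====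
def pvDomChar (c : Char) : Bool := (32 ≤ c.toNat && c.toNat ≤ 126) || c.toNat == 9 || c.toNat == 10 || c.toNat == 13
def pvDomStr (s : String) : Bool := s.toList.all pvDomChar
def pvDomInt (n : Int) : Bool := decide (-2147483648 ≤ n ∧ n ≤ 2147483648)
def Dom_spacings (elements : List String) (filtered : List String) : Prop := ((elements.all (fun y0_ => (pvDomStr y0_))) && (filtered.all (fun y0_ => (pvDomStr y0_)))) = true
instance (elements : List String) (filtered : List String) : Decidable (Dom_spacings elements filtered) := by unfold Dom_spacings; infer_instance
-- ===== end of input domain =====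

-- B replaces A's per-word repeated list.index scans by ONE enumerate pass building a
-- word→positions dict, then consecutive differences per filtered word (objective: faster).

-- ===== PORT A =====
-- words.index(word, i): first occurrence at position ≥ i (exact for 0 ≤ i; none = ValueError)
def pyIndexFrom (words : List String) (word : String) (i : Nat) : Option Nat :=
  (PySem.List.index? (words.drop i) word).map (fun k => i + k)

-- the 'for i in range(0, len(words))' loop of Python's indexes, with 'except: break'
def indexesGo (words : List String) (word : String) (i : Nat) (fuel : Nat)
    (results : List Int) : List Int :=
  match fuel with
  | 0 => results
  | fuel' + 1 =>
    match pyIndexFrom words word i with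
    | none => results          -- except: break
    | some idx =>
      indexesGo words word (i + 1) fuel'
        (if (idx : Int) ∈ results then results else results ++ [(idx : Int)])

def indexes (words : List String) (word : String) : List Int :=
  indexesGo words word 0 words.length []

def spacings (elements : List String) (filtered : List String) : List Int :=
  let numbers : List (List Int) :=
    (PySem.List.pyRange 0 (filtered.length : Int) 1).foldl
      (fun acc j => acc ++ [indexes elements (PySem.List.pyGetD filtered j "")]) []
  numbers.foldl
    (fun diff l =>
      (PySem.List.pyRange 0 ((l.length : Int) - 1) 1).foldl
        (fun d j => d ++ [PySem.List.pyGetD l (j + 1) 0 - PySem.List.pyGetD l j 0]) diff) []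

-- ===== PORT B =====
-- pos.setdefault(w, []).append(i)  =  modify w [] (· ++ [i])
def buildPos (elements : List String) : PySem.Dict String (List Int) :=
  (PySem.List.enumerate elements).foldl
    (fun d p => d.modify p.2 [] (fun ps => ps ++ [p.1])) PySem.Dict.empty

def diffsB (ps : List Int) : List Int :=
  (ps.zip ps.tail).map (fun p => p.2 - p.1)

def spacings_alt (elements : List String) (filtered : List String) : List Int :=
  let pos := buildPos elements
  filtered.foldl (fun out w => out ++ diffsB (pos.getD w [])) []

-- ===== PRECONDITION & SPEC =====
def Spec_spacings (elements : List String) (filtered : List String) (out : List Int) : Prop := out = spacings_alt elements filtered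
instance (elements : List String) (filtered : List String) (out : List Int) : Decidable (Spec_spacings elements filtered out) := by unfold Spec_spacings; infer_instance

-- ===== CLAIM (what is proved, stated in full; the proofs are below) =====
def Claim_equal_spacings : Prop := ∀ (elements : List String) (filtered : List String), Dom_spacings elements filtered → Spec_spacings elements filtered (spacings elements filtered)

-- ===== LEMMAS AND PROOFS =====

-- occurrence positions of w in xs, counting from k (absolute positions when xs = words.drop k)
def posFrom (xs : List String) (w : String) (k : Nat) : List Nat :=
  match xs with
  | [] => []
  | x :: t => if x = w then k :: posFrom t w (k + 1) else posFrom t w (k + 1)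

-- the same positions as Ints
def posZ (xs : List String) (w : String) (k : Nat) : List Int :=
  (posFrom xs w k).map (fun (p : Nat) => (p : Int))

lemma posFrom_shift (xs : List String) (w : String) :
    ∀ k, posFrom xs w k = (posFrom xs w 0).map (fun p => p + k) := by
  induction xs with
  | nil => intro k; simp [posFrom]
  | cons x t ih =>
    intro k
    by_cases h : x = w <;>
      simp [posFrom, h, ih (k + 1), ih 1] <;>
      (intro a _; omega)

lemma mem_posFrom {xs : List String} {w : String} {k p : Nat}
    (hp : p ∈ posFrom xs w k) : k ≤ p ∧ p < k + xs.length := by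
  induction xs generalizing k with
  | nil => simp [posFrom] at hp
  | cons x t ih =>
    rw [List.length_cons]
    by_cases h : x = w <;> simp [posFrom, h] at hp
    · rcases hp with rfl | hp
      · omega
      · have := ih hp; omega
    · have := ih hp; omega

lemma posFrom_pairwise (xs : List String) (w : String) (k : Nat) :
    (posFrom xs w k).Pairwise (· < ·) := by
  induction xs generalizing k with
  | nil => simp [posFrom]
  | cons x t ih =>
    by_cases h : x = w <;> simp [posFrom, h]
    · exact ⟨fun p hp => (mem_posFrom hp).1, ih (k + 1)⟩
    · exact ih (k + 1)

lemma index?_eq_head (xs : List String) (w : String) :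
    PySem.List.index? xs w = (posFrom xs w 0).head? := by
  induction xs with
  | nil => simp [posFrom, PySem.List.index?_eq_idxOf?]
  | cons x t ih =>
    by_cases h : x = w
    · subst h
      rw [PySem.List.index?_cons_self]
      simp [posFrom]
    · rw [PySem.List.index?_cons_of_ne t h, ih]
      simp [posFrom, h, posFrom_shift t w 1, List.head?_map]

lemma posFrom_drop_step (words : List String) (w : String) (i : Nat) (hi : i < words.length) :
    posFrom (words.drop i) w i =
      if words[i] = w then i :: posFrom (words.drop (i + 1)) w (i + 1)
      else posFrom (words.drop (i + 1)) w (i + 1) := by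
  rw [List.drop_eq_getElem_cons hi]
  simp [posFrom]

lemma go_spec (words : List String) (w : String) :
    ∀ (fuel i : Nat) (R : List Int), fuel = words.length - i →
    (∀ p ∈ (posFrom (words.drop i) w i).tail, (p : Int) ∉ R) →
    indexesGo words w i fuel R =
      R ++ (posZ (words.drop i) w i).filter (fun z => decide (z ∉ R)) := by
  intro fuel
  induction fuel with
  | zero =>
    intro i R hf _
    have hd : words.drop i = [] := List.drop_eq_nil_of_le (by omega)
    simp [indexesGo, hd, posFrom, posZ]
  | succ fuel' ih =>
    intro i R hf hR
    have hi : i < words.length := by omega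
    cases hL : posFrom (words.drop i) w i with
    | nil =>
      have h0 : posFrom (words.drop i) w 0 = [] := by
        have := posFrom_shift (words.drop i) w i
        rw [hL] at this
        exact List.map_eq_nil_iff.mp this.symm
      have hnone : pyIndexFrom words w i = none := by
        unfold pyIndexFrom
        rw [index?_eq_head, h0]
        rfl
      simp [indexesGo, hnone, posZ, hL]
    | cons q rest =>
      -- head of the absolute position list is (relative head) + i
      have hsh := posFrom_shift (words.drop i) w i
      rw [hL] at hsh
      obtain ⟨q0, rest0, h0, hq0⟩ :
          ∃ q0 rest0, posFrom (words.drop i) w 0 = q0 :: rest0 ∧ q = q0 + i := by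
        cases h0 : posFrom (words.drop i) w 0 with
        | nil => rw [h0] at hsh; simp at hsh
        | cons a b =>
          rw [h0] at hsh; simp at hsh
          exact ⟨a, b, rfl, by omega⟩
      have hidx : pyIndexFrom words w i = some q := by
        unfold pyIndexFrom
        rw [index?_eq_head, h0]
        simp [hq0, Nat.add_comm]
      -- facts about q and rest
      have hpw := posFrom_pairwise (words.drop i) w i
      rw [hL] at hpw
      have hqlt : ∀ p ∈ rest, q < p := (List.pairwise_cons.mp hpw).1
      have hrestR : ∀ p ∈ rest, (p : Int) ∉ R := by
        intro p hp; exact hR p (by simp [hL, hp])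
      set R' : List Int := if (q : Int) ∈ R then R else R ++ [(q : Int)] with hR'
      have hrestR' : ∀ p ∈ rest, (p : Int) ∉ R' := by
        intro p hp
        have hne : ((p : Int)) ≠ (q : Int) := by
          have := hqlt p hp
          omega
        rw [hR']; split
        · exact hrestR p hp
        · simp [hrestR p hp, hne]
      have hqR' : (q : Int) ∈ R' := by
        rw [hR']; split
        · assumption
        · simp
      have step := posFrom_drop_step words w i hi
      rw [hL] at step
      have hrec : indexesGo words w i (fuel' + 1) R = indexesGo words w (i + 1) fuel' R' := by
        simp [indexesGo, hidx, hR']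
      have hfr : (rest.map (fun (p : Nat) => (p : Int))).filter (fun z => decide (z ∉ R))
          = rest.map (fun (p : Nat) => (p : Int)) := by
        apply List.filter_eq_self.mpr
        intro z hz
        simp only [List.mem_map] at hz
        obtain ⟨p, hp, rfl⟩ := hz
        simp [hrestR p hp]
      have hfr' : (rest.map (fun (p : Nat) => (p : Int))).filter (fun z => decide (z ∉ R'))
          = rest.map (fun (p : Nat) => (p : Int)) := by
        apply List.filter_eq_self.mpr
        intro z hz
        simp only [List.mem_map] at hz
        obtain ⟨p, hp, rfl⟩ := hz
        simp [hrestR' p hp]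
      rw [hrec]
      by_cases hw : words[i] = w
      · -- q = i and the next absolute position list is rest
        rw [if_pos hw] at step
        have hrest : posFrom (words.drop (i + 1)) w (i + 1) = rest := by
          injection step.symm
        rw [ih (i + 1) R' (by omega) (by
          rw [hrest]; intro p hp
          exact hrestR' p (List.tail_subset rest hp))]
        unfold posZ
        rw [hrest, hL]
        simp only [List.map_cons, List.filter_cons, hfr, hfr']
        by_cases hqR : (q : Int) ∈ R
        · simp [hR', hqR]
        · simp [hR', hqR]
      · rw [if_neg hw] at step
        rw [ih (i + 1) R' (by omega) (by
          rw [← step]; intro p hp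
          simp only [List.tail_cons] at hp
          exact hrestR' p hp)]
        unfold posZ
        rw [← step, hL]
        simp only [List.map_cons, List.filter_cons, hfr, hfr']
        simp only [hqR', not_true_eq_false, decide_false]
        by_cases hqR : (q : Int) ∈ R
        · simp [hR', hqR]
        · simp [hR', hqR]

lemma indexes_eq_posZ (words : List String) (w : String) :
    indexes words w = posZ words w 0 := by
  unfold indexes
  rw [go_spec words w words.length 0 [] (by omega) (by simp)]
  simp

-- the inner difference loop of A equals diffsB
lemma diff_loop_eq (l : List Int) (acc : List Int) :
    (PySem.List.pyRange 0 ((l.length : Int) - 1) 1).foldl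
      (fun d j => d ++ [PySem.List.pyGetD l (j + 1) 0 - PySem.List.pyGetD l j 0]) acc
    = acc ++ diffsB l := by
  rw [PySem.List.foldl_append_singleton_eq_map]
  congr 1
  rw [PySem.List.pyRange_one]
  simp only [List.map_map]
  unfold diffsB
  apply List.ext_getElem
  · simp [List.length_zip]
  · intro k hk1 hk2
    simp only [List.getElem_map, Function.comp, List.getElem_zip, List.getElem_range,
      List.getElem_tail]
    have hk : k + 1 < l.length := by
      simp [List.length_zip] at hk2; omega
    rw [show ((0 : Int) + k) + 1 = ((k + 1 : Nat) : Int) by push_cast; ring,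
        show ((0 : Int) + k) = ((k : Nat) : Int) by omega]
    rw [PySem.List.pyGetD_natCast, PySem.List.pyGetD_natCast]
    simp [List.getD_eq_getElem?_getD, List.getElem?_eq_getElem hk,
      List.getElem?_eq_getElem (by omega : k < l.length)]

-- B's dict lookup gives exactly the occurrence positions
lemma buildPos_getD (elements : List String) (w : String) :
    (buildPos elements).getD w [] = posZ elements w 0 := by
  unfold buildPos
  have hmap : (PySem.List.enumerate elements).foldl
      (fun d p => d.modify p.2 [] (fun ps => ps ++ [p.1])) PySem.Dict.empty
      = ((PySem.List.enumerate elements).map (fun p => (p.2, p.1))).foldl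
          (fun d p => d.modify p.1 [] (fun ps => ps ++ [p.2])) PySem.Dict.empty := by
    rw [List.foldl_map]
  rw [hmap, PySem.Dict.getD_foldl_modify_append, PySem.Dict.getD_empty]
  simp only [List.nil_append]
  suffices h : ∀ (es : List String) (k : Nat),
      ((((PySem.List.enumerate es (k : Int)).map (fun p => (p.2, p.1))).filter
        (fun p => p.1 == w)).map (fun p => p.2))
      = posZ es w k by
    simpa using h elements 0
  intro es
  induction es with
  | nil => intro k; simp [PySem.List.enumerate_nil, posFrom, posZ]
  | cons x t ih =>
    intro k
    rw [PySem.List.enumerate_cons,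
        show ((k : Int) + 1) = ((k + 1 : Nat) : Int) by push_cast; ring]
    by_cases hx : x = w <;>
      simp [hx, posFrom, posZ] <;>
      simpa [posZ] using ih (k + 1)

lemma spacings_eq_flatMap (elements filtered : List String) :
    spacings elements filtered
      = filtered.flatMap (fun w => diffsB (indexes elements w)) := by
  unfold spacings
  rw [PySem.List.foldl_pyRange_zero_pyGetD' filtered ""
        (fun acc x => acc ++ [indexes elements x]) [],
      PySem.List.foldl_append_singleton_eq_map]
  simp only [List.nil_append]
  induction filtered using List.reverseRecOn with
  | nil => simp
  | append_singleton t x ih =>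
    rw [List.map_append, List.foldl_append, ih]
    simp only [List.map_cons, List.map_nil, List.foldl_cons, List.foldl_nil]
    rw [diff_loop_eq]
    simp

lemma spacings_alt_eq_flatMap (elements filtered : List String) :
    spacings_alt elements filtered
      = filtered.flatMap (fun w => diffsB ((buildPos elements).getD w [])) := by
  unfold spacings_alt
  rw [PySem.List.foldl_append_eq_flatMap]
  simp

-- ===== VERDICT (by name: the statement is the Claim_ definition above) =====
theorem spacings_spec : Claim_equal_spacings := by
  intro elements filtered _
  unfold Spec_spacings
  rw [spacings_eq_flatMap, spacings_alt_eq_flatMap]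
  apply List.flatMap_congr
  intro w _
  rw [indexes_eq_posZ, buildPos_getD]
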